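-- pv_equiv track=rewrite | github.com/brunom764/algoritmos-EstruturaDeDados | vetores, fila e pilha/pilhaCaderno.py | pilhaCheck
-- ===== SOURCE A (Python) =====
-- def pilhaCheck(pilha):
--     f = 0
--     for i, capa in enumerate(pilha):
--         if capa == 'V':
--             if f == 0:
--                 return f"Incorreto, devido a capa na posição {i + 1}."
--             else:
--                 f -= 1
--         elif capa == 'F':
--             f += 1
--     if f == 0:
--       return "Correto."
--     else:
--       for i in range(len(pilha) - 1, -1, -1):
--         if pilha[i] == 'F':
--           f -= 1
--           if f == 0:
--             return f"Incorreto, devido a capa na posição {i + 1}."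
-- ===== SOURCE B (Python) =====
-- def pilhaCheck(pilha):
--     f = 0
--     fpos = []
--     for i, capa in enumerate(pilha):
--         if capa == 'V':
--             if f == 0:
--                 return f"Incorreto, devido a capa na posição {i + 1}."
--             f -= 1
--         elif capa == 'F':
--             f += 1
--             fpos.append(i)
--     if f == 0:
--         return "Correto."
--     i = fpos[len(fpos) - f]
--     return f"Incorreto, devido a capa na posição {i + 1}."
-- ===== Notes on version B (the rewrite author's own statement) =====
-- stated objective: simpler
-- what changed: The backward re-scan of the list is removed: the single forward pass also records the indices of every 'F', and the culprit is read directly as the f-th 'F' from the end via fpos[len(fpos)-f].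
import Mathlib
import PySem

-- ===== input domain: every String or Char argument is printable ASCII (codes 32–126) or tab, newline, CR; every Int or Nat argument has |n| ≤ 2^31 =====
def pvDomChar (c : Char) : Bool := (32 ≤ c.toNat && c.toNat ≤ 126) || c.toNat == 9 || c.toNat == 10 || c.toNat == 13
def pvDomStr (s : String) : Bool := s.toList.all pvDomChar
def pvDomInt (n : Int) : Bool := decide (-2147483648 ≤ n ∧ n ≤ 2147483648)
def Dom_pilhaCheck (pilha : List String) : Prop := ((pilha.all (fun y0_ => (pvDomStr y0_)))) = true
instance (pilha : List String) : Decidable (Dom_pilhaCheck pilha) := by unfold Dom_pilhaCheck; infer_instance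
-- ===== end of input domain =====

-- B removes A's backward re-scan: the forward pass also records each index of an 'F', and the
-- culprit position is read directly as fpos[len(fpos)-f] (objective: simpler, same return value).

-- the error message both programs build (f-string with the 1-based position)
def pvMsg (n : Nat) : String := "Incorreto, devido a capa na posição " ++ toString n ++ "."

-- ===== PORT A =====
-- forward loop of A: early return = .inl message, normal end = .inr f
def pvFwdA : List String → Nat → Int → Sum String Int
  | [], _, f => .inr f
  | c :: rest, i, f =>
    if c = "V" then
      if f = 0 then .inl (pvMsg (i + 1)) else pvFwdA rest (i + 1) (f - 1)
    else if c = "F" then pvFwdA rest (i + 1) (f + 1)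
    else pvFwdA rest (i + 1) f

-- backward loop of A over range(len-1, -1, -1); none = loop finished without f hitting 0
def pvBwdA (pilha : List String) : Nat → Int → Option String
  | 0, _ => none
  | i + 1, f =>
    if pilha.getD i "" = "F" then
      if f - 1 = 0 then some (pvMsg (i + 1)) else pvBwdA pilha i (f - 1)
    else pvBwdA pilha i f

def pilhaCheck (pilha : List String) : String :=
  match pvFwdA pilha 0 0 with
  | .inl s => s
  | .inr f =>
    if f = 0 then "Correto."
    else (pvBwdA pilha pilha.length f).getD ""   -- "" is unreachable (the loop always returns)

-- ===== PORT B =====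
-- forward loop of B: same early return, also accumulates the indices of the 'F's
def pvFwdB : List String → Nat → Int → List Nat → Sum String (Int × List Nat)
  | [], _, f, fpos => .inr (f, fpos)
  | c :: rest, i, f, fpos =>
    if c = "V" then
      if f = 0 then .inl (pvMsg (i + 1)) else pvFwdB rest (i + 1) (f - 1) fpos
    else if c = "F" then pvFwdB rest (i + 1) (f + 1) (fpos ++ [i])
    else pvFwdB rest (i + 1) f fpos

def pilhaCheck_alt (pilha : List String) : String :=
  match pvFwdB pilha 0 0 [] with
  | .inl s => s
  | .inr (f, fpos) =>
    if f = 0 then "Correto."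
    else
      let i := (PySem.List.pyGet? fpos ((fpos.length : Int) - f)).getD 0  -- in range here
      pvMsg (i + 1)

-- ===== PRECONDITION & SPEC =====
def Spec_pilhaCheck (pilha : List String) (out : String) : Prop := out = pilhaCheck_alt pilha
instance (pilha : List String) (out : String) : Decidable (Spec_pilhaCheck pilha out) := by unfold Spec_pilhaCheck; infer_instance

-- ===== CLAIM (what is proved, stated in full; the proofs are below) =====
def Claim_equal_pilhaCheck : Prop := ∀ (pilha : List String), Dom_pilhaCheck pilha → Spec_pilhaCheck pilha (pilhaCheck pilha)

-- ===== LEMMAS AND PROOFS =====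

-- the indices (offset by i) of the 'F' entries of a list
def pvFpos : List String → Nat → List Nat
  | [], _ => []
  | c :: rest, i => if c = "F" then i :: pvFpos rest (i + 1) else pvFpos rest (i + 1)

theorem pvFpos_append (xs ys : List String) (j : Nat) :
    pvFpos (xs ++ ys) j = pvFpos xs j ++ pvFpos ys (j + xs.length) := by
  induction xs generalizing j with
  | nil => simp [pvFpos]
  | cons c rest ih =>
    simp only [List.cons_append, pvFpos, ih, List.length_cons]
    split_ifs <;> simp <;> ring_nf

theorem pvFwdB_eq (rest : List String) (i : Nat) (f : Int) (fpos : List Nat) :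
    pvFwdB rest i f fpos =
      match pvFwdA rest i f with
      | .inl s => .inl s
      | .inr f' => .inr (f', fpos ++ pvFpos rest i) := by
  induction rest generalizing i f fpos with
  | nil => simp [pvFwdA, pvFwdB, pvFpos]
  | cons c r ih =>
    by_cases h1 : c = "V"
    · subst h1
      by_cases h2 : f = 0
      · simp [pvFwdA, pvFwdB, h2]
      · simpa [pvFwdA, pvFwdB, h2] using ih (i+1) (f-1) fpos
    · by_cases h3 : c = "F"
      · subst h3
        cases h : pvFwdA r (i+1) (f+1) <;>
          simp [pvFwdA, pvFwdB, pvFpos, h, ih]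
      · simpa [pvFwdA, pvFwdB, pvFpos, h1, h3] using ih (i+1) f fpos

theorem pvFwdA_bounds (rest : List String) (i : Nat) (f f' : Int) (h0 : 0 ≤ f)
    (h : pvFwdA rest i f = .inr f') : 0 ≤ f' ∧ f' ≤ f + ((pvFpos rest i).length : Int) := by
  induction rest generalizing i f with
  | nil => simp [pvFwdA] at h; omega
  | cons c r ih =>
    by_cases h1 : c = "V"
    · by_cases h2 : f = 0
      · simp [pvFwdA, h1, h2] at h
      · simp only [pvFwdA, h1, h2, if_true, if_false] at h
        have := ih (i+1) (f-1) (by omega) h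
        have hcf : ¬ c = "F" := by simp [h1]
        simp only [pvFpos, hcf, if_false]
        omega
    · by_cases h3 : c = "F"
      · simp only [pvFwdA, h3, if_true] at h
        have := ih (i+1) (f+1) (by omega) h
        simp only [pvFpos, h3, if_true, List.length_cons]
        push_cast
        omega
      · simp only [pvFwdA, h1, h3, if_false] at h
        have := ih (i+1) f h0 h
        simp only [pvFpos, h3, if_false]
        omega

theorem pvFpos_take_succ (pilha : List String) (i : Nat) (hi : i < pilha.length) :
    pvFpos (pilha.take (i+1)) 0 =
      pvFpos (pilha.take i) 0 ++ (if pilha.getD i "" = "F" then [i] else []) := by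
  rw [List.take_add_one, pvFpos_append]
  congr 1
  have h1 : pilha[i]?.toList = [pilha[i]] := by simp [List.getElem?_eq_getElem hi]
  have h2 : pilha.getD i "" = pilha[i] := by
    simp [List.getD, List.getElem?_eq_getElem hi]
  rw [h1, h2]
  have hl : (pilha.take i).length = i := by simp; omega
  simp only [pvFpos, hl]
  split_ifs <;> simp

theorem pvBwdA_eq (pilha : List String) (i : Nat) (f : Int) (hi : i ≤ pilha.length)
    (hf : 0 < f) (hle : f ≤ ((pvFpos (pilha.take i) 0).length : Int)) :
    pvBwdA pilha i f =
      some (pvMsg (((pvFpos (pilha.take i) 0).getD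
        ((pvFpos (pilha.take i) 0).length - f.toNat) 0) + 1)) := by
  induction i generalizing f with
  | zero => simp [pvFpos] at hle; omega
  | succ i ih =>
    have hi' : i < pilha.length := by omega
    have hstep := pvFpos_take_succ pilha i hi'
    simp only [pvBwdA]
    by_cases hF : pilha.getD i "" = "F"
    · simp only [hF, if_true] at hstep ⊢
      by_cases h1 : f - 1 = 0
      · have hf1 : f = 1 := by omega
        simp only [h1, if_true]
        rw [hstep]
        have : (pvFpos (pilha.take i) 0 ++ [i]).length - (1 : Int).toNat
            = (pvFpos (pilha.take i) 0).length := by simp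
        rw [hf1, this]
        rw [List.getD_eq_getElem?_getD, List.getElem?_append_right (by omega)]
        simp
      · have hle' : f - 1 ≤ ((pvFpos (pilha.take i) 0).length : Int) := by
          rw [hstep] at hle; simp at hle; omega
        have hf2 : 2 ≤ f := by omega
        have hpos : 1 ≤ (pvFpos (pilha.take i) 0).length := by omega
        have htn : (f - 1).toNat = f.toNat - 1 := by omega
        have htn1 : 1 ≤ f.toNat - 1 := by omega
        simp only [h1, if_false]
        rw [ih (f-1) (by omega) (by omega) hle']
        rw [hstep]
        have hidx : (pvFpos (pilha.take i) 0 ++ [i]).length - f.toNat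
            = (pvFpos (pilha.take i) 0).length - (f-1).toNat := by simp; omega
        rw [hidx, List.getD_eq_getElem?_getD, List.getD_eq_getElem?_getD,
            List.getElem?_append_left (by omega)]
    · simp only [hF, if_false] at hstep ⊢
      rw [hstep] at hle
      simp at hle
      rw [ih f (by omega) hf (by exact_mod_cast hle), hstep]
      simp

-- ===== VERDICT (by name: the statement is the Claim_ definition above) =====
theorem pilhaCheck_spec : Claim_equal_pilhaCheck := by
  intro pilha _
  unfold Spec_pilhaCheck pilhaCheck pilhaCheck_alt
  rw [pvFwdB_eq]
  cases h : pvFwdA pilha 0 0 with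
  | inl s => rfl
  | inr f =>
    simp only [List.nil_append]
    by_cases hf : f = 0
    · simp [hf]
    · have hb := pvFwdA_bounds pilha 0 0 f le_rfl h
      have hfp : 0 < f := lt_of_le_of_ne hb.1 (Ne.symm hf)
      have hle : f ≤ ((pvFpos pilha 0).length : Int) := by have := hb.2; omega
      have htake : pilha.take pilha.length = pilha := List.take_length
      have := pvBwdA_eq pilha pilha.length f le_rfl hfp (by rw [htake]; exact hle)
      rw [htake] at this
      simp only [hf, if_false, this, Option.getD_some]
      congr 2
      set fp := pvFpos pilha 0 with hfpdef
      have hidx0 : (0:Int) ≤ (fp.length : Int) - f := by omega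
      have hidx1 : ((fp.length : Int) - f).toNat < fp.length := by omega
      rw [PySem.List.pyGet?_of_nonneg _ hidx0,
          List.getElem?_eq_getElem hidx1, Option.getD_some,
          List.getD_eq_getElem?_getD, List.getElem?_eq_getElem (by omega), Option.getD_some]
      congr 1
      omega
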